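-- pv_equiv track=rewrite | github.com/akiofujitani/auto_calc | src/auto_calc/data_organizer.py | plain_dict_list_completer
-- ===== SOURCE A (Python) =====
-- from collections import Counter
--
-- def length_counter(plain_dict):
--     count_list = []
--     for line in plain_dict:
--         count_list.append(len(line))
--     values_counter = Counter(count_list)
--     sorted_value = list(values_counter.keys())
--     return max(sorted_value)
--
-- def plain_dict_extract_keys(plain_dict=dict):
--     default_length = length_counter(plain_dict)
--     for dict_value in plain_dict:
--         if len(dict_value) == default_length:
--             return list(dict_value.keys())
--
-- def plain_dict_list_completer(plain_dict=list):
--     keys_list = plain_dict_extract_keys(plain_dict)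
--     updated_plain_dict = []
--     for values_dict in plain_dict:
--         temp_dict = {}
--         for key in keys_list:
--             if key not in values_dict.keys():
--                 temp_dict[key] = ''
--             else:
--                 temp_dict[key] = values_dict[key]
--         updated_plain_dict.append(temp_dict)
--     return updated_plain_dict
-- ===== SOURCE B (Python) =====
-- def plain_dict_list_completer(plain_dict=list):
--     keys_list = list(max(plain_dict, key=len).keys())
--     return [{key: values_dict.get(key, '') for key in keys_list}
--             for values_dict in plain_dict]
-- ===== Notes on version B (the rewrite author's own statement) =====
-- stated objective: simpler
-- what changed: B drops the sizes-list/Counter table, the max-over-counter-keys pass and the separate rescan for the first dict of that size, computing the reference key list in one max(plain_dict, key=len) pass and building the result with a single nested comprehension instead of the two accumulator loops.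
-- outside the precondition, e.g. on plain_dict_list_completer([]): A raises ValueError, B raises ValueError
import Mathlib
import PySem

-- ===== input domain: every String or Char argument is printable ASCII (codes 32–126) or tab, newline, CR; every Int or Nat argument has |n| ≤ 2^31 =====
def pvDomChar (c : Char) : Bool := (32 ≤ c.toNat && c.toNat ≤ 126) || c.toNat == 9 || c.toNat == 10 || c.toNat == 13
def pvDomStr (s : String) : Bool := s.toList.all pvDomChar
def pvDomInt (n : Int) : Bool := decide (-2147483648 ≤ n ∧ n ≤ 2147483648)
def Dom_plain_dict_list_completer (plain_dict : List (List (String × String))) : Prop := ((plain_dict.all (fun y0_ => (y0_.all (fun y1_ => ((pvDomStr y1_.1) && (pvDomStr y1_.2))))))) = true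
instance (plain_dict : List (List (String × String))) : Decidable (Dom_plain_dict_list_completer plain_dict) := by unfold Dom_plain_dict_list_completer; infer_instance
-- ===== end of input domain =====

-- B inlines A's Counter-table + rescan decomposition into a single max(…, key=len) pass
-- and builds the output with one comprehension (objective: simpler).
-- Pre_ excludes only the empty list, on which both A and B raise ValueError (max of an empty sequence).


-- ===== PORT A =====
-- length_counter: sizes list, Counter, max over its keys (none = the ValueError on empty input)
def pvLengthCounter (plain_dict : List (List (String × String))) : Option Int :=
  let count_list : List Int :=
    plain_dict.foldl (fun acc line => acc ++ [((PySem.Dict.ofList line).size : Int)]) []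
  let values_counter := PySem.Dict.counter count_list
  let sorted_value := values_counter.keys
  PySem.List.max? sorted_value (fun y => y)

-- the 'for dict_value in plain_dict: if len == default: return keys' loop (none = fell through)
def pvExtractLoop (plain_dict : List (List (String × String))) (default_length : Int) :
    Option (List String) :=
  match plain_dict with
  | [] => none
  | d :: rest =>
      if ((PySem.Dict.ofList d).size : Int) = default_length then some (PySem.Dict.ofList d).keys
      else pvExtractLoop rest default_length

def pvExtractKeys (plain_dict : List (List (String × String))) : Option (List String) :=
  match pvLengthCounter plain_dict with
  | none => none            -- Python raises ValueError inside length_counter here (outside Pre_)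
  | some dl => pvExtractLoop plain_dict dl

def plain_dict_list_completer (plain_dict : List (List (String × String))) :
    List (List (String × String)) :=
  -- keys_list is None only on the empty input (outside Pre_), where the loop below is empty anyway
  let keys_list := (pvExtractKeys plain_dict).getD []
  plain_dict.foldl
    (fun updated values_dict =>
      let vd := PySem.Dict.ofList values_dict
      let temp_dict := keys_list.foldl
        (fun t key =>
          if vd.contains key = false then t.insert key ""
          else t.insert key (vd.getD key ""))
        PySem.Dict.empty
      updated ++ [temp_dict.items]) []

-- ===== PORT B =====
def plain_dict_list_completer_alt (plain_dict : List (List (String × String))) :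
    List (List (String × String)) :=
  match PySem.List.max? plain_dict (fun line => ((PySem.Dict.ofList line).size : Int)) with
  | none => []              -- Python's max raises ValueError here (outside Pre_)
  | some best =>
      let keys_list := (PySem.Dict.ofList best).keys
      plain_dict.map (fun values_dict =>
        -- the dict comprehension {key: vd.get(key, '') for key in keys_list}
        (keys_list.foldl
          (fun t key => t.insert key ((PySem.Dict.ofList values_dict).getD key ""))
          PySem.Dict.empty).items)

-- ===== PRECONDITION & SPEC =====
-- Pre_ excludes only the empty list, on which both A and B raise ValueError (max of empty sequence).
def Pre_plain_dict_list_completer (plain_dict : List (List (String × String))) : Prop :=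
  plain_dict ≠ []
instance (plain_dict : List (List (String × String))) : Decidable (Pre_plain_dict_list_completer plain_dict) := by unfold Pre_plain_dict_list_completer; infer_instance
def pvWitness_plain_dict_list_completer : (List (List (String × String))) :=
  [[("a", "1"), ("b", "2")], [("a", "3")]]
def Spec_plain_dict_list_completer (plain_dict : List (List (String × String))) (out : List (List (String × String))) : Prop := out = plain_dict_list_completer_alt plain_dict
instance (plain_dict : List (List (String × String))) (out : List (List (String × String))) : Decidable (Spec_plain_dict_list_completer plain_dict out) := by unfold Spec_plain_dict_list_completer; infer_instance

-- ===== CLAIM (what is proved, stated in full; the proofs are below) =====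
def Claim_equal_plain_dict_list_completer : Prop := ∀ (plain_dict : List (List (String × String))), Dom_plain_dict_list_completer plain_dict → Pre_plain_dict_list_completer plain_dict → Spec_plain_dict_list_completer plain_dict (plain_dict_list_completer plain_dict)

-- ===== LEMMAS AND PROOFS =====

def pvStep (key : List (String × String) → Int) (m y : List (String × String)) :
    List (String × String) := if key m < key y then y else m

lemma pv_max?_cons (key : List (String × String) → Int)
    (x : List (String × String)) (t : List (List (String × String))) :
    PySem.List.max? (x :: t) key = some (t.foldl (pvStep key) x) := by
  induction t generalizing x with
  | nil => rfl
  | cons y t ih =>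
      rw [List.foldl_cons, ← ih (pvStep key x y)]
      simp only [PySem.List.max?, List.foldl_cons]
      congr 1
      by_cases h : key x < key y <;> simp [pvStep, h]

lemma pv_foldl_step_le (key : List (String × String) → Int)
    (t : List (List (String × String))) (x : List (String × String)) :
    key x ≤ key (t.foldl (pvStep key) x) := by
  induction t generalizing x with
  | nil => exact le_refl _
  | cons y t ih =>
      simp only [List.foldl_cons, pvStep]
      split
      · exact le_trans (le_of_lt (by assumption)) (ih y)
      · exact ih x

def pvKey (line : List (String × String)) : Int := ((PySem.Dict.ofList line).size : Int)

lemma pv_extract_first_max (t : List (List (String × String))) (x : List (String × String)) :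
    pvExtractLoop (x :: t) (pvKey (t.foldl (pvStep pvKey) x)) =
      some (PySem.Dict.ofList (t.foldl (pvStep pvKey) x)).keys := by
  induction t generalizing x with
  | nil => simp [pvExtractLoop, pvKey]
  | cons y t ih =>
      have hfold : (y :: t).foldl (pvStep pvKey) x = t.foldl (pvStep pvKey) (pvStep pvKey x y) := by
        simp [List.foldl_cons]
      rw [hfold]
      by_cases h : pvKey x < pvKey y
      · have hy : pvStep pvKey x y = y := by simp [pvStep, h]
        rw [hy]
        have hlt : pvKey x < pvKey (t.foldl (pvStep pvKey) y) :=
          lt_of_lt_of_le h (pv_foldl_step_le pvKey t y)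
        have hne : ¬ ((PySem.Dict.ofList x).size : Int) = pvKey (t.foldl (pvStep pvKey) y) := by
          simp only [pvKey] at hlt ⊢; omega
        rw [show pvExtractLoop (x :: y :: t) (pvKey (t.foldl (pvStep pvKey) y)) =
            pvExtractLoop (y :: t) (pvKey (t.foldl (pvStep pvKey) y)) from by
          simp [pvExtractLoop, hne]]
        exact ih y
      · have hx : pvStep pvKey x y = x := by simp [pvStep, h]
        rw [hx]
        have hih := ih x
        by_cases he : pvKey x = pvKey (t.foldl (pvStep pvKey) x)
        · -- the loop stops at x, and x's keys are the winner's keys via ih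
          have heN : (PySem.Dict.ofList x).size = (PySem.Dict.ofList (t.foldl (pvStep pvKey) x)).size := by
            simp only [pvKey] at he; exact_mod_cast he
          have h1 : pvExtractLoop (x :: t) (pvKey (t.foldl (pvStep pvKey) x)) =
              some (PySem.Dict.ofList x).keys := by
            simp [pvExtractLoop, pvKey, heN]
          rw [h1] at hih
          simpa [pvExtractLoop, pvKey, heN] using hih
        · have hxb : pvKey x < pvKey (t.foldl (pvStep pvKey) x) :=
            lt_of_le_of_ne (pv_foldl_step_le pvKey t x) he
          have hyb : ¬ ((PySem.Dict.ofList y).size : Int) = pvKey (t.foldl (pvStep pvKey) x) := by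
            have : pvKey y ≤ pvKey x := le_of_not_gt h
            simp only [pvKey] at this hxb ⊢; omega
          have hxe : ¬ ((PySem.Dict.ofList x).size : Int) = pvKey (t.foldl (pvStep pvKey) x) := by
            simp only [pvKey] at he ⊢; exact he
          rw [show pvExtractLoop (x :: y :: t) (pvKey (t.foldl (pvStep pvKey) x)) =
              pvExtractLoop t (pvKey (t.foldl (pvStep pvKey) x)) from by
            simp [pvExtractLoop, hxe, hyb]]
          rw [show pvExtractLoop (x :: t) (pvKey (t.foldl (pvStep pvKey) x)) =
              pvExtractLoop t (pvKey (t.foldl (pvStep pvKey) x)) from by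
            simp [pvExtractLoop, hxe]] at hih
          exact hih

lemma pv_foldl_step_ge (t : List (List (String × String))) (x c : List (String × String))
    (hc : c ∈ x :: t) : pvKey c ≤ pvKey (t.foldl (pvStep pvKey) x) := by
  induction t generalizing x with
  | nil => simp at hc; subst hc; exact le_refl _
  | cons y t ih =>
      have hstep : pvKey x ⊔ pvKey y ≤ pvKey (pvStep pvKey x y) := by
        by_cases h : pvKey x < pvKey y <;> simp [pvStep, h] <;> omega
      rw [List.foldl_cons]
      rcases hc with _ | ⟨_, hc⟩
      · exact le_trans (le_trans (le_max_left _ _) hstep) (pv_foldl_step_le pvKey t _)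
      · rcases List.mem_cons.mp hc with rfl | hc
        · exact le_trans (le_trans (le_max_right _ _) hstep) (pv_foldl_step_le pvKey t _)
        · exact ih (pvStep pvKey x y) (List.mem_cons_of_mem _ hc)

lemma pv_lengthCounter_eq (x : List (String × String)) (t : List (List (String × String))) :
    pvLengthCounter (x :: t) = some (pvKey (t.foldl (pvStep pvKey) x)) := by
  have hcl : (x :: t).foldl (fun acc line => acc ++ [((PySem.Dict.ofList line).size : Int)]) []
      = (x :: t).map pvKey := by
    simpa [pvKey] using
      PySem.List.foldl_append_singleton_eq_map
        (fun line => ((PySem.Dict.ofList line).size : Int)) (x :: t) []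
  simp only [pvLengthCounter, hcl, PySem.Dict.keys_counter]
  -- the set of sizes is nonempty, so max? returns some M
  set s := PySem.Set.ofList ((x :: t).map pvKey) with hs
  set b := t.foldl (pvStep pvKey) x with hb
  have hbmem : b ∈ x :: t := by
    have := pv_max?_cons pvKey x t
    exact PySem.List.max?_mem this
  have hbs : pvKey b ∈ s := (PySem.Set.mem_ofList _ _).mpr (List.mem_map_of_mem hbmem)
  obtain ⟨M, hM⟩ : ∃ M, PySem.List.max? s (fun y => y) = some M := by
    cases hmx : PySem.List.max? s (fun y => y) with
    | none =>
        exact absurd ((PySem.List.max?_eq_none_iff _ _).mp hmx) (List.ne_nil_of_mem hbs)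
    | some M => exact ⟨M, rfl⟩
  rw [hM]
  have hMs : M ∈ s := PySem.List.max?_mem hM
  have hMle : M ≤ pvKey b := by
    rcases List.mem_map.mp ((PySem.Set.mem_ofList _ _).mp hMs) with ⟨c, hc, rfl⟩
    simpa [hb] using pv_foldl_step_ge t x c hc
  have hbM : pvKey b ≤ M := PySem.List.max?_isMax hM _ hbs
  exact congrArg some (le_antisymm hMle hbM)

lemma pv_alt_inner (keys_list : List String) (hnd : keys_list.Nodup)
    (values_dict : List (String × String)) :
    (keys_list.foldl
      (fun t key => t.insert key ((PySem.Dict.ofList values_dict).getD key ""))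
      PySem.Dict.empty).items =
    keys_list.map (fun key => (key, (PySem.Dict.ofList values_dict).getD key "")) := by
  simpa using PySem.Dict.items_foldl_insert_fresh keys_list (fun k => k)
    (fun key => (PySem.Dict.ofList values_dict).getD key "") PySem.Dict.empty
    (fun a _ => PySem.Dict.contains_empty a) (by simpa using hnd)

lemma pv_temp_dict_eq (keys_list : List String) (hnd : keys_list.Nodup)
    (values_dict : List (String × String)) :
    (keys_list.foldl
      (fun t key =>
        if (PySem.Dict.ofList values_dict).contains key = false then t.insert key ""
        else t.insert key ((PySem.Dict.ofList values_dict).getD key ""))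
      PySem.Dict.empty).items =
    keys_list.map (fun key => (key, (PySem.Dict.ofList values_dict).getD key "")) := by
  have hf : (fun (t : PySem.Dict String String) key =>
        if (PySem.Dict.ofList values_dict).contains key = false then t.insert key ""
        else t.insert key ((PySem.Dict.ofList values_dict).getD key "")) =
      fun t key => t.insert key ((PySem.Dict.ofList values_dict).getD key "") := by
    funext t key
    by_cases h : (PySem.Dict.ofList values_dict).contains key = false
    · simp [h, PySem.Dict.getD_of_not_contains _ _ h]
    · simp [h]
  rw [hf]
  exact pv_alt_inner keys_list hnd values_dict

-- ===== VERDICT (by name: the statement is the Claim_ definition above) =====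
theorem plain_dict_list_completer_spec : Claim_equal_plain_dict_list_completer := by
  intro pd _ hpre
  unfold Spec_plain_dict_list_completer
  cases pd with
  | nil => exact absurd rfl hpre
  | cons x t =>
      have hkeyfun : (fun line => ((PySem.Dict.ofList line).size : Int)) = pvKey := rfl
      have hnd := PySem.Dict.nodup_keys_ofList (κ := String) (ν := String)
      have hex : pvExtractKeys (x :: t) = some (PySem.Dict.ofList (t.foldl (pvStep pvKey) x)).keys := by
        unfold pvExtractKeys
        rw [pv_lengthCounter_eq]
        exact pv_extract_first_max t x
      have halt : plain_dict_list_completer_alt (x :: t) =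
          (x :: t).map (fun vd => (PySem.Dict.ofList (t.foldl (pvStep pvKey) x)).keys.map
            (fun key => (key, (PySem.Dict.ofList vd).getD key ""))) := by
        unfold plain_dict_list_completer_alt
        rw [hkeyfun, pv_max?_cons]
        refine List.map_congr_left (fun vd _ => ?_)
        exact pv_alt_inner _ (hnd _) vd
      have hA : plain_dict_list_completer (x :: t) =
          (x :: t).map (fun vd => (PySem.Dict.ofList (t.foldl (pvStep pvKey) x)).keys.map
            (fun key => (key, (PySem.Dict.ofList vd).getD key ""))) := by
        unfold plain_dict_list_completer
        rw [hex]
        simp only [Option.getD_some]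
        rw [PySem.List.foldl_append_singleton_eq_map
          (fun values_dict => ((PySem.Dict.ofList (t.foldl (pvStep pvKey) x)).keys.foldl
            (fun td key =>
              if (PySem.Dict.ofList values_dict).contains key = false then td.insert key ""
              else td.insert key ((PySem.Dict.ofList values_dict).getD key ""))
            PySem.Dict.empty).items) (x :: t) []]
        simp only [List.nil_append]
        refine List.map_congr_left (fun vd _ => ?_)
        exact pv_temp_dict_eq _ (hnd _) vd
      rw [hA, halt]
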